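-- pv_equiv track=rewrite | github.com/WisconsinRobotics/WRover_Software | src/wr_logic_ai/src/inputFakeData.py | get_laser_ranges
-- ===== SOURCE A (Python) =====
-- def get_laser_ranges(t = 0):
--         inputData = []
--         for x in range(360):
--             distance = 10
--             if t <= x and x <= t + 40:
--                 distance = 3
--             inputData.append(distance)
--         return inputData
-- ===== SOURCE B (Python) =====
-- def get_laser_ranges(t = 0):
--     inputData = [10] * 360
--     lo = max(0, t)
--     hi = min(359, t + 40)
--     if lo <= hi:
--         inputData[lo:hi + 1] = [3] * (hi - lo + 1)
--     return inputData
-- ===== Notes on version B (the rewrite author's own statement) =====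
-- stated objective: alternative
-- what changed: Replaces the per-index loop that tests the condition at every angle with one clipped-window computation and a single slice fill over a preallocated all-ten list.
import Mathlib
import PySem

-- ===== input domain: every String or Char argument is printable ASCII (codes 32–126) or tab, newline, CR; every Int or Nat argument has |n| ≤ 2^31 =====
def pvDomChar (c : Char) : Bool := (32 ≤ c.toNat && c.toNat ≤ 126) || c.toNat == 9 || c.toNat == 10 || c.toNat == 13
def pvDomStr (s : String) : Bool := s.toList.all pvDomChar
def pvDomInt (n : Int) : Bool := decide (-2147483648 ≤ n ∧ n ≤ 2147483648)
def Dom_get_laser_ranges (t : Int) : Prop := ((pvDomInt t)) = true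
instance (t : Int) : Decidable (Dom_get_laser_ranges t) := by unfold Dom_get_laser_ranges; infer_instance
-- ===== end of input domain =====

-- B builds the all-10 list once and overwrites one clipped contiguous window with 3s
-- (single slice fill) instead of testing the condition at every one of the 360 indices.

-- ===== PORT A =====
def get_laser_ranges (t : Int) : List Int :=
  (PySem.List.pyRange 0 360 1).foldl
    (fun inputData x =>
      let distance : Int := 10
      let distance := if t ≤ x ∧ x ≤ t + 40 then (3 : Int) else distance
      inputData ++ [distance]) []

-- ===== PORT B =====
def get_laser_ranges_alt (t : Int) : List Int :=
  let inputData := List.replicate 360 (10 : Int)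
  let lo := max 0 t
  let hi := min 359 (t + 40)
  if lo ≤ hi then
    inputData.take lo.toNat ++ List.replicate (hi - lo + 1).toNat 3
      ++ inputData.drop (hi + 1).toNat
  else inputData

-- ===== PRECONDITION & SPEC =====
def Spec_get_laser_ranges (t : Int) (out : List Int) : Prop := out = get_laser_ranges_alt t
instance (t : Int) (out : List Int) : Decidable (Spec_get_laser_ranges t out) := by unfold Spec_get_laser_ranges; infer_instance

-- ===== CLAIM (what is proved, stated in full; the proofs are below) =====
def Claim_equal_get_laser_ranges : Prop := ∀ (t : Int), Dom_get_laser_ranges t → Spec_get_laser_ranges t (get_laser_ranges t)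

-- ===== LEMMAS AND PROOFS =====

theorem get_laser_ranges_eq_map (t : Int) :
    get_laser_ranges t
      = (List.range 360).map (fun k : Nat => if t ≤ (k : Int) ∧ (k : Int) ≤ t + 40 then (3 : Int) else 10) := by
  unfold get_laser_ranges
  rw [PySem.List.foldl_append_singleton_eq_map, PySem.List.pyRange_one, List.map_map]
  simp

-- ===== VERDICT (by name: the statement is the Claim_ definition above) =====
theorem get_laser_ranges_spec : Claim_equal_get_laser_ranges := by
  intro t _
  show get_laser_ranges t = get_laser_ranges_alt t
  rw [get_laser_ranges_eq_map]
  unfold get_laser_ranges_alt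
  by_cases h : max 0 t ≤ min 359 (t + 40)
  · simp only [h, if_pos, List.take_replicate, List.drop_replicate]
    apply List.ext_getElem
    · simp only [List.length_map, List.length_range, List.length_append,
        List.length_replicate]
      omega
    · intro i hi1 hi2
      simp only [List.length_map, List.length_range] at hi1
      simp only [List.length_append, List.length_replicate] at hi2
      simp only [List.getElem_map, List.getElem_range, List.getElem_append,
        List.getElem_replicate, List.length_replicate, List.length_append]
      split_ifs with h1 h2 h3 <;> try rfl
      all_goals exfalso; omega
  · simp only [h, if_neg, not_false_iff]
    apply List.ext_getElem
    · simp only [List.length_map, List.length_range, List.length_replicate]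
    · intro i hi1 hi2
      simp only [List.length_map, List.length_range] at hi1
      simp only [List.getElem_map, List.getElem_range, List.getElem_replicate]
      split_ifs with h1
      · exfalso; omega
      · rfl
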